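-- pv_equiv track=rewrite | github.com/sunxxuns/aiter | hsa/gfx950/fmha_v3_fwd_fp8/tools/tr8_read_base_solver.py | bitop3
-- ===== SOURCE A (Python) =====
-- def bitop3(a: int, b: int, c: int, ttbl: int) -> int:
--     out = 0
--     for i in range(32):
--         s0 = (a >> i) & 1
--         s1 = (b >> i) & 1
--         s2 = (c >> i) & 1
--         idx = s0 | (s1 << 1) | (s2 << 2)
--         bit = (ttbl >> idx) & 1
--         out |= (bit << i)
--     return out & 0xFFFFFFFF
-- ===== SOURCE B (Python) =====
-- def bitop3(a: int, b: int, c: int, ttbl: int) -> int: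
--     out = 0
--     for idx in range(8):
--         if (ttbl >> idx) & 1:
--             m = (a if idx & 1 else ~a) & 0xFFFFFFFF
--             m &= (b if idx & 2 else ~b) & 0xFFFFFFFF
--             m &= (c if idx & 4 else ~c) & 0xFFFFFFFF
--             out |= m
--     return out
-- ===== Notes on version B (the rewrite author's own statement) =====
-- stated objective: alternative
-- what changed: Instead of scanning all 32 bit positions and assembling the output bit by bit, B loops over the 8 truth-table entries and, for each set entry, ORs in the whole 32-bit minterm mask built from a/b/c and their complements with word-wide bitwise operations.
import Mathlib
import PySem

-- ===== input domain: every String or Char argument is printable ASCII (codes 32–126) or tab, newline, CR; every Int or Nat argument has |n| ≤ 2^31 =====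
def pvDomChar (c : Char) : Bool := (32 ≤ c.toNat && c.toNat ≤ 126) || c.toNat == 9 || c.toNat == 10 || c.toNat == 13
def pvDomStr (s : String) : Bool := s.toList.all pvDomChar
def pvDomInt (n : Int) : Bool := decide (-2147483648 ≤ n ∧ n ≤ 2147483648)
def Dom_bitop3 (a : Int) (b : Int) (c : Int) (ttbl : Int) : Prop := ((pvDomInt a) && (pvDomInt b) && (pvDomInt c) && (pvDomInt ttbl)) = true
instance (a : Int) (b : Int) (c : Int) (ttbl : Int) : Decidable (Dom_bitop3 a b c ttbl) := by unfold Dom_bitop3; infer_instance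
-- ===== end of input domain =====

-- B replaces A's 32-step bit-serial scan by an 8-step union of word-wide minterm masks (a different, word-parallel algorithm with the same result).

-- ===== PORT A =====
-- Python: for i in range(32): s0=(a>>i)&1; …; idx=s0|(s1<<1)|(s2<<2); bit=(ttbl>>idx)&1; out|=bit<<i; return out & 0xFFFFFFFF
-- 'ttbl >> idx' is ported as 'ttbl >>> idx.toNat'; idx = s0|(s1<<1)|(s2<<2) with s0,s1,s2 ∈ {0,1} is always in {0,…,7}, so .toNat is exact.
def bitop3 (a : Int) (b : Int) (c : Int) (ttbl : Int) : Int :=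
  let out := (List.range 32).foldl (fun (out : Int) (i : Nat) =>
    let s0 := PySem.Int.band (a >>> i) 1
    let s1 := PySem.Int.band (b >>> i) 1
    let s2 := PySem.Int.band (c >>> i) 1
    let idx := PySem.Int.bor (PySem.Int.bor s0 (s1 <<< (1 : Nat))) (s2 <<< (2 : Nat))
    let bit := PySem.Int.band (ttbl >>> idx.toNat) 1
    PySem.Int.bor out (bit <<< i)) 0
  PySem.Int.band out 4294967295

-- ===== PORT B =====
-- Python Source B: for idx in range(8): if (ttbl>>idx)&1: m = (a if idx&1 else ~a)&0xFFFFFFFF; m &= …b…; m &= …c…; out |= m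
def bitop3_alt (a : Int) (b : Int) (c : Int) (ttbl : Int) : Int :=
  (List.range 8).foldl (fun (out : Int) (idx : Nat) =>
    if PySem.Int.band (ttbl >>> idx) 1 ≠ 0 then
      let m := PySem.Int.band (if idx &&& 1 ≠ 0 then a else Int.not a) 4294967295
      let m := PySem.Int.band m (PySem.Int.band (if idx &&& 2 ≠ 0 then b else Int.not b) 4294967295)
      let m := PySem.Int.band m (PySem.Int.band (if idx &&& 4 ≠ 0 then c else Int.not c) 4294967295)
      PySem.Int.bor out m
    else out) 0

-- ===== PRECONDITION & SPEC =====
def Spec_bitop3 (a : Int) (b : Int) (c : Int) (ttbl : Int) (out : Int) : Prop := out = bitop3_alt a b c ttbl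
instance (a : Int) (b : Int) (c : Int) (ttbl : Int) (out : Int) : Decidable (Spec_bitop3 a b c ttbl out) := by unfold Spec_bitop3; infer_instance

-- ===== CLAIM (what is proved, stated in full; the proofs are below) =====
def Claim_equal_bitop3 : Prop := ∀ (a : Int) (b : Int) (c : Int) (ttbl : Int), Dom_bitop3 a b c ttbl → Spec_bitop3 a b c ttbl (bitop3 a b c ttbl)

-- ===== LEMMAS AND PROOFS =====

-- the low 32 bits of x as a natural number (x mod 2^32, Python's x & 0xFFFFFFFF)
def nrep (x : Int) : Nat := (x % 4294967296).toNat

-- Python's i-th bit of x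
def bitb (x : Int) (i : Nat) : Bool := Nat.testBit (nrep x) i

-- the truth-table index selected at bit position i
def mint (a b c : Int) (i : Nat) : Nat :=
  (if bitb a i then 1 else 0) + (if bitb b i then 2 else 0) + (if bitb c i then 4 else 0)

theorem nrep_lt (x : Int) : nrep x < 4294967296 := by unfold nrep; omega

theorem mint_lt (a b c : Int) (i : Nat) : mint a b c i < 8 := by
  unfold mint; split_ifs <;> norm_num

-- the central arithmetic fact: (x >> i) % 2 reads bit i of the low 32 bits of x, for i < 32
theorem shift_mod_eq (x : Int) (i : Nat) (h : i < 32) :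
    PySem.Int.mod (x >>> i) 2 = if bitb x i then 1 else 0 := by
  rw [Int.shiftRight_eq_div_pow, PySem.Int.mod_eq_emod_of_pos (by norm_num)]
  unfold bitb nrep
  set r : Int := x % 4294967296 with hr
  have hr0 : 0 ≤ r := by omega
  have hrlt : r < 4294967296 := by omega
  have h32 : i + (31 - i + 1) = 32 := by omega
  have hsplit : (4294967296 : Int) = (2 ^ i : Nat) * (2 * 2 ^ (31 - i) : Nat) := by
    push_cast
    rw [← pow_succ', ← pow_add, h32]
    norm_num
  have hdiv : x / ((2 ^ i : Nat) : Int) = r / ((2 ^ i : Nat) : Int) + 2 * ((2 ^ (31 - i) : Nat) * (x / 4294967296)) := by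
    have hx : x = r + ((2 ^ i : Nat) : Int) * (((2 * 2 ^ (31 - i) : Nat) : Int) * (x / 4294967296)) := by
      rw [← mul_assoc, ← hsplit]; omega
    conv_lhs => rw [hx]
    rw [Int.add_mul_ediv_left _ _ (by positivity)]
    push_cast
    ring
  rw [hdiv, Int.add_mul_emod_self_left]
  have hrn : r = ((r.toNat : Nat) : Int) := by omega
  rw [hrn, ← Int.natCast_div, show (2:ℤ) = ((2:Nat):ℤ) from rfl, ← Int.natCast_emod, Int.toNat_natCast]
  rw [Nat.testBit_eq_decide_div_mod_eq]
  by_cases hb : r.toNat / 2 ^ i % 2 = 1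
  · simp [hb]
  · have h0 : r.toNat / 2 ^ i % 2 = 0 := by omega
    simp [h0]

theorem band_one_bit (x : Int) (i : Nat) (h : i < 32) :
    PySem.Int.band (x >>> i) 1 = if bitb x i then 1 else 0 := by
  rw [PySem.Int.band_one]; exact shift_mod_eq x i h

theorem natAnd_mask (n : Nat) : n &&& 4294967295 = n % 4294967296 := by
  apply Nat.eq_of_testBit_eq
  intro j
  have h1 : (4294967295 : Nat) = 2 ^ 32 - 1 := by norm_num
  have h2 : (4294967296 : Nat) = 2 ^ 32 := by norm_num
  rw [Nat.testBit_and, h1, h2, Nat.testBit_two_pow_sub_one, Nat.testBit_mod_two_pow, Bool.and_comm]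

theorem band_mask (x : Int) : PySem.Int.band x 4294967295 = ((nrep x : Nat) : Int) := by
  unfold PySem.Int.band
  by_cases hx : 0 ≤ x
  · rw [if_pos hx, if_pos (by norm_num : (0:ℤ) ≤ 4294967295)]
    rw [show ((4294967295:ℤ).toNat) = 4294967295 from rfl, natAnd_mask]
    unfold nrep
    omega
  · rw [if_neg hx, if_pos (by norm_num : (0:ℤ) ≤ 4294967295)]
    rw [show ((4294967295:ℤ).toNat) = 4294967295 from rfl, Nat.and_comm, natAnd_mask]
    unfold nrep
    omega

theorem intNot_eq (x : Int) : Int.not x = -x - 1 := by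
  cases x with
  | ofNat n => simp [Int.not]; omega
  | negSucc n => simp [Int.not]

theorem nrep_not (x : Int) : nrep (Int.not x) = 4294967295 - nrep x := by
  rw [intNot_eq]; unfold nrep; omega

theorem sel_testBit (x : Int) (cond : Prop) [Decidable cond] (j : Nat) :
    Nat.testBit (nrep (if cond then x else Int.not x)) j
      = (decide (j < 32) && (bitb x j == decide cond)) := by
  by_cases hj : j < 32
  · by_cases hc : cond
    · rw [if_pos hc]; simp [hj, hc, bitb]
    · rw [if_neg hc, nrep_not]
      have h2 : nrep x < 2 ^ 32 := by have := nrep_lt x; omega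
      have h1 : (4294967295 : Nat) - nrep x = 2 ^ 32 - (nrep x + 1) := by omega
      rw [h1, Nat.testBit_two_pow_sub_succ h2]
      unfold bitb
      simp [hj, hc]
  · have hlt : ∀ y : Int, Nat.testBit (nrep y) j = false := fun y =>
      Nat.testBit_lt_two_pow (lt_of_lt_of_le (nrep_lt y)
        (by calc (4294967296 : Nat) = 2 ^ 32 := by norm_num
             _ ≤ 2 ^ j := Nat.pow_le_pow_right (by norm_num) (by omega)))
    rw [hlt]
    simp [hj]

theorem mint_eq_iff (a b c : Int) (j n : Nat) (hn : n < 8) :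
    mint a b c j = n ↔ (bitb a j = decide (n &&& 1 ≠ 0) ∧ bitb b j = decide (n &&& 2 ≠ 0) ∧ bitb c j = decide (n &&& 4 ≠ 0)) := by
  interval_cases n <;>
    rcases hsa : bitb a j <;> rcases hsb : bitb b j <;> rcases hsc : bitb c j <;>
      simp [mint, hsa, hsb, hsc]

theorem A_fold (a b c ttbl : Int) (n : Nat) (hn : n ≤ 32) :
    0 ≤ ((List.range n).foldl (fun (out : Int) (i : Nat) =>
        let s0 := PySem.Int.band (a >>> i) 1
        let s1 := PySem.Int.band (b >>> i) 1
        let s2 := PySem.Int.band (c >>> i) 1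
        let idx := PySem.Int.bor (PySem.Int.bor s0 (s1 <<< (1 : Nat))) (s2 <<< (2 : Nat))
        let bit := PySem.Int.band (ttbl >>> idx.toNat) 1
        PySem.Int.bor out (bit <<< i)) 0) ∧
    ∀ j, (Int.toNat ((List.range n).foldl (fun (out : Int) (i : Nat) =>
        let s0 := PySem.Int.band (a >>> i) 1
        let s1 := PySem.Int.band (b >>> i) 1
        let s2 := PySem.Int.band (c >>> i) 1
        let idx := PySem.Int.bor (PySem.Int.bor s0 (s1 <<< (1 : Nat))) (s2 <<< (2 : Nat))
        let bit := PySem.Int.band (ttbl >>> idx.toNat) 1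
        PySem.Int.bor out (bit <<< i)) 0)).testBit j
      = (decide (j < n) && bitb ttbl (mint a b c j)) := by
  induction n with
  | zero => simp
  | succ n ih =>
    obtain ⟨ih0, ih1⟩ := ih (by omega)
    rw [List.range_succ, List.foldl_append, List.foldl_cons, List.foldl_nil]
    set F := (List.range n).foldl (fun (out : Int) (i : Nat) =>
        let s0 := PySem.Int.band (a >>> i) 1
        let s1 := PySem.Int.band (b >>> i) 1
        let s2 := PySem.Int.band (c >>> i) 1
        let idx := PySem.Int.bor (PySem.Int.bor s0 (s1 <<< (1 : Nat))) (s2 <<< (2 : Nat))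
        let bit := PySem.Int.band (ttbl >>> idx.toNat) 1
        PySem.Int.bor out (bit <<< i)) 0 with hF
    simp only []
    rw [band_one_bit a n (by omega), band_one_bit b n (by omega), band_one_bit c n (by omega)]
    have hidx : PySem.Int.bor (PySem.Int.bor (if bitb a n then 1 else 0)
          ((if bitb b n then (1:ℤ) else 0) <<< (1 : Nat))) ((if bitb c n then (1:ℤ) else 0) <<< (2 : Nat))
        = ((mint a b c n : Nat) : Int) := by
      rcases hsa : bitb a n <;> rcases hsb : bitb b n <;> rcases hsc : bitb c n <;>
        simp [mint, hsa, hsb, hsc] <;> decide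
    rw [hidx, Int.toNat_natCast]
    rw [band_one_bit ttbl (mint a b c n) (by have := mint_lt a b c n; omega)]
    rcases ht : bitb ttbl (mint a b c n) with _ | _
    · rw [if_neg (by simp)]
      rw [Int.zero_shiftLeft, PySem.Int.bor_zero]
      refine ⟨ih0, ?_⟩
      intro j
      rw [ih1 j]
      by_cases hj : j = n
      · subst hj; simp [ht]
      · by_cases hj2 : j < n <;> simp [hj2] <;> omega
    · rw [if_pos (by simp)]
      have hsl : (1 : ℤ) <<< n = ((2 ^ n : Nat) : Int) := by
        rw [Int.shiftLeft_eq]; push_cast; ring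
      rw [hsl, PySem.Int.bor_of_nonneg ih0 (by positivity)]
      refine ⟨by positivity, ?_⟩
      intro j
      rw [Int.toNat_natCast, Nat.testBit_or, Int.toNat_natCast, Nat.testBit_two_pow, ih1 j]
      by_cases hj : j = n
      · subst hj; simp [ht]
      · by_cases hj2 : j < n <;> simp [hj2, Ne.symm hj] <;> omega

theorem B_fold (a b c ttbl : Int) (n : Nat) (hn : n ≤ 8) :
    0 ≤ ((List.range n).foldl (fun (out : Int) (idx : Nat) =>
        if PySem.Int.band (ttbl >>> idx) 1 ≠ 0 then
          let m := PySem.Int.band (if idx &&& 1 ≠ 0 then a else Int.not a) 4294967295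
          let m := PySem.Int.band m (PySem.Int.band (if idx &&& 2 ≠ 0 then b else Int.not b) 4294967295)
          let m := PySem.Int.band m (PySem.Int.band (if idx &&& 4 ≠ 0 then c else Int.not c) 4294967295)
          PySem.Int.bor out m
        else out) 0) ∧
    ∀ j, (Int.toNat ((List.range n).foldl (fun (out : Int) (idx : Nat) =>
        if PySem.Int.band (ttbl >>> idx) 1 ≠ 0 then
          let m := PySem.Int.band (if idx &&& 1 ≠ 0 then a else Int.not a) 4294967295
          let m := PySem.Int.band m (PySem.Int.band (if idx &&& 2 ≠ 0 then b else Int.not b) 4294967295)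
          let m := PySem.Int.band m (PySem.Int.band (if idx &&& 4 ≠ 0 then c else Int.not c) 4294967295)
          PySem.Int.bor out m
        else out) 0)).testBit j
      = (decide (j < 32) && decide (mint a b c j < n) && bitb ttbl (mint a b c j)) := by
  induction n with
  | zero => simp
  | succ n ih =>
    obtain ⟨ih0, ih1⟩ := ih (by omega)
    rw [List.range_succ, List.foldl_append, List.foldl_cons, List.foldl_nil]
    set G := (List.range n).foldl (fun (out : Int) (idx : Nat) =>
        if PySem.Int.band (ttbl >>> idx) 1 ≠ 0 then
          let m := PySem.Int.band (if idx &&& 1 ≠ 0 then a else Int.not a) 4294967295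
          let m := PySem.Int.band m (PySem.Int.band (if idx &&& 2 ≠ 0 then b else Int.not b) 4294967295)
          let m := PySem.Int.band m (PySem.Int.band (if idx &&& 4 ≠ 0 then c else Int.not c) 4294967295)
          PySem.Int.bor out m
        else out) 0 with hG
    simp only []
    rw [band_one_bit ttbl n (by omega)]
    rcases ht : bitb ttbl n with _ | _
    · rw [if_neg (by simp)]
      refine ⟨ih0, ?_⟩
      intro j
      rw [ih1 j]
      by_cases hm : mint a b c j = n
      · rw [hm]; simp [ht]
      · have hiff : decide (mint a b c j < n) = decide (mint a b c j < n + 1) := by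
          by_cases h2 : mint a b c j < n
          · simp [h2]; omega
          · have h3 : ¬ mint a b c j < n + 1 := by omega
            simp [h2, h3]
        rw [hiff]
    · rw [if_pos (by simp)]
      rw [band_mask (if n &&& 1 ≠ 0 then a else Int.not a),
          band_mask (if n &&& 2 ≠ 0 then b else Int.not b),
          band_mask (if n &&& 4 ≠ 0 then c else Int.not c)]
      have hpq : PySem.Int.band ((nrep (if n &&& 1 ≠ 0 then a else Int.not a) : Nat) : Int)
          ((nrep (if n &&& 2 ≠ 0 then b else Int.not b) : Nat) : Int)
          = (((nrep (if n &&& 1 ≠ 0 then a else Int.not a) &&& nrep (if n &&& 2 ≠ 0 then b else Int.not b) : Nat)) : Int) := by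
        rw [PySem.Int.band_of_nonneg (by positivity) (by positivity)]; simp
      rw [hpq]
      have hpqr : PySem.Int.band (((nrep (if n &&& 1 ≠ 0 then a else Int.not a) &&& nrep (if n &&& 2 ≠ 0 then b else Int.not b) : Nat)) : Int)
          ((nrep (if n &&& 4 ≠ 0 then c else Int.not c) : Nat) : Int)
          = (((nrep (if n &&& 1 ≠ 0 then a else Int.not a) &&& nrep (if n &&& 2 ≠ 0 then b else Int.not b) &&& nrep (if n &&& 4 ≠ 0 then c else Int.not c) : Nat)) : Int) := by
        rw [PySem.Int.band_of_nonneg (by positivity) (by positivity)]; simp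
      rw [hpqr]
      rw [PySem.Int.bor_of_nonneg ih0 (by positivity)]
      refine ⟨by positivity, ?_⟩
      intro j
      simp only [Int.toNat_natCast, Nat.testBit_or, Nat.testBit_and]
      rw [ih1 j, sel_testBit a _ j, sel_testBit b _ j, sel_testBit c _ j]
      by_cases hj : j < 32
      · by_cases hm : mint a b c j = n
        · have hb3 := (mint_eq_iff a b c j n (by omega)).mp hm
          rw [hm]
          simp [hj, ht, hb3.1, hb3.2.1, hb3.2.2]
        · have hb3 := fun h1 h2 h3 => hm ((mint_eq_iff a b c j n (by omega)).mpr ⟨h1, h2, h3⟩)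
          by_cases hm2 : mint a b c j < n
          · simp only [hj, decide_true, Bool.true_and]
            have : (mint a b c j < n + 1) = True := by simp; omega
            simp only [hm2, decide_true, Bool.true_and, this]
            rcases h1 : bitb a j == decide (n &&& 1 ≠ 0) with _ | _
            · simp
            · rcases h2 : bitb b j == decide (n &&& 2 ≠ 0) with _ | _
              · simp
              · rcases h3 : bitb c j == decide (n &&& 4 ≠ 0) with _ | _
                · simp
                · exact absurd (hb3 (by simpa using h1) (by simpa using h2) (by simpa using h3)) (by simp)
          · have hm3 : ¬ (mint a b c j < n + 1) := by omega
            simp only [hj, decide_true, Bool.true_and, hm2, hm3, decide_false, Bool.false_and]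
            rcases h1 : bitb a j == decide (n &&& 1 ≠ 0) with _ | _
            · simp
            · rcases h2 : bitb b j == decide (n &&& 2 ≠ 0) with _ | _
              · simp
              · rcases h3 : bitb c j == decide (n &&& 4 ≠ 0) with _ | _
                · simp
                · exact absurd (hb3 (by simpa using h1) (by simpa using h2) (by simpa using h3)) (by simp)
      · simp [hj]

theorem main_eq (a b c ttbl : Int) : bitop3 a b c ttbl = bitop3_alt a b c ttbl := by
  unfold bitop3 bitop3_alt
  obtain ⟨hA0, hA1⟩ := A_fold a b c ttbl 32 le_rfl
  obtain ⟨hB0, hB1⟩ := B_fold a b c ttbl 8 le_rfl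
  simp only []
  rw [PySem.Int.band_of_nonneg hA0 (by norm_num), ← Int.toNat_of_nonneg hB0]
  congr 1
  apply Nat.eq_of_testBit_eq
  intro j
  rw [Nat.testBit_and, hA1 j, hB1 j]
  have h1 : ((4294967295:ℤ).toNat) = 2 ^ 32 - 1 := by decide
  rw [h1, Nat.testBit_two_pow_sub_one]
  have hm := mint_lt a b c j
  by_cases hj : j < 32 <;> simp [hj, hm]

-- ===== VERDICT (by name: the statement is the Claim_ definition above) =====
theorem bitop3_spec : Claim_equal_bitop3 := by
  intro a b c ttbl _
  unfold Spec_bitop3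
  exact main_eq a b c ttbl
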